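-- pv_equiv track=rewrite | github.com/eressea/server | process/accept-orders.py | formatpar
-- ===== SOURCE A (Python) =====
-- def formatpar(string, l=76, indent=2):
--     words = string.split()
--     res = ""
--     ll = 0
--     first = 1
--
--     for word in words:
--         if first == 1:
--             res = word
--             first = 0
--             ll = len(word)
--         else:
--             if ll + len(word) > l:
--                 res = res + u"\n"+" "*indent+word
--                 ll = len(word) + indent
--             else:
--                 res = res+" "+word
--                 ll = ll + len(word) + 1
--
--     return res+"\n"
-- ===== SOURCE B (Python) =====
-- def _upper(pref, t, lo):
--     """First index j in [lo, len(pref)] with pref[j] > t (pref is increasing): binary search."""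
--     hi = len(pref)
--     while lo < hi:
--         mid = (lo + hi) // 2
--         if pref[mid] <= t:
--             lo = mid + 1
--         else:
--             hi = mid
--     return lo
--
-- def formatpar(string, l=76, indent=2):
--     words = string.split()
--     if not words:
--         return "\n"
--     # prefix sums: pref[j] = sum(len(w) + 1 for w in words[:j])
--     pref = [0]
--     for w in words:
--         pref.append(pref[-1] + len(w) + 1)
--     n = len(words)
--     chunks = []
--     i = 0
--     base = 0
--     while i < n:
--         # the line starting at word i (with starting budget base) holds words[i:e],
--         # where e is found by binary search over the prefix sums (the search result
--         # is always >= i + 2, so the max only makes the loop's progress explicit)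
--         e = max(i + 1, _upper(pref, l + 2 + pref[i] - base, i + 2) - 1)
--         chunks.append(" ".join(words[i:e]))
--         i = e
--         base = indent
--     return chunks[0] + "".join("\n" + " " * indent + c for c in chunks[1:]) + "\n"
-- ===== Notes on version B (the rewrite author's own statement) =====
-- stated objective: alternative
-- what changed: Replaces A's single greedy fold that tracks a running line length and concatenates the result word by word with a prefix-sum array over word costs plus a per-line binary search that locates each line break directly, followed by joining the word slices.
import Mathlib
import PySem

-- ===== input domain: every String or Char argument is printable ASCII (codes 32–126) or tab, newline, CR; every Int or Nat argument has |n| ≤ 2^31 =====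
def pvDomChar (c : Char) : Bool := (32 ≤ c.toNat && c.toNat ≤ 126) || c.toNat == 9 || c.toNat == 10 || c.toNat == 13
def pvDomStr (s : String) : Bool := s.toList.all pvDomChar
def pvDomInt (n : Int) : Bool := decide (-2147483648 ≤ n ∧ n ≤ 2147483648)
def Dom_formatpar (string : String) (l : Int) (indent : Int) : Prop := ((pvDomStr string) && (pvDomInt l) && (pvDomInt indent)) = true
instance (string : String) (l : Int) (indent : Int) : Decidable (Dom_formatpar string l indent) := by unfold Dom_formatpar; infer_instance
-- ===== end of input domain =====

-- B replaces A's single greedy fold (running line length, word-by-word concatenation) by a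
-- prefix-sum array over word costs plus a per-line binary search that locates each break,
-- then joins the word slices; objective: alternative algorithm, same return value.

-- shared primitive: Python's `" " * n` (empty for n ≤ 0); exact port of str*int for a space
def pvSpaces (n : Int) : String := String.ofList (List.replicate n.toNat ' ')

-- ===== PORT A =====
-- loop body of A (the for-loop's step on the state (res, ll, first))
def pvStepA (l indent : Int) (st : String × Int × Int) (word : String) : String × Int × Int :=
  if st.2.2 == 1 then
    (word, PySem.Str.len word, 0)
  else if st.2.1 + PySem.Str.len word > l then
    (st.1 ++ "\n" ++ pvSpaces indent ++ word, PySem.Str.len word + indent, st.2.2)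
  else
    (st.1 ++ " " ++ word, st.2.1 + PySem.Str.len word + 1, st.2.2)

def formatpar (string : String) (l : Int) (indent : Int) : String :=
  let words := PySem.Str.split₀ string
  let st := words.foldl (pvStepA l indent) ("", 0, 1)
  st.1 ++ "\n"

-- ===== PORT B =====
-- Source B's hand-written `_upper(pref, t, lo)`: binary search for the first index j in
-- [lo, len(pref)] with pref[j] > t; `pref[mid]` is in range (mid < hi ≤ len), so getD is exact
def pvUpperGo (pref : List Int) (t : Int) (lo hi : Nat) : Nat :=
  if _h : lo < hi then
    if pref.getD ((lo + hi) / 2) 0 ≤ t then pvUpperGo pref t ((lo + hi) / 2 + 1) hi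
    else pvUpperGo pref t lo ((lo + hi) / 2)
  else lo
termination_by hi - lo
decreasing_by all_goals omega

-- Source B's `e = max(i + 1, _upper(pref, l + 2 + pref[i] - base, i + 2) - 1)` (named so pvLines can use it twice)
def pvBreak (pref : List Int) (l base : Int) (i : Nat) : Nat :=
  max (i + 1) (pvUpperGo pref (l + 2 + pref.getD i 0 - base) (i + 2) pref.length - 1)

-- Source B's while loop: one chunk (rendered line, `" ".join(words[i:e])`) per iteration;
-- `words[i:e]` with 0 ≤ i ≤ e is exactly (drop i).take (e - i)
def pvLines (words : List String) (pref : List Int) (l indent : Int) (n i : Nat) (base : Int) : List String :=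
  if _h : i < n then
    PySem.Str.join " " ((words.drop i).take (pvBreak pref l base i - i)) ::
      pvLines words pref l indent n (pvBreak pref l base i) indent
  else []
termination_by n - i
decreasing_by
  simp only [pvBreak]
  omega

def formatpar_alt (string : String) (l : Int) (indent : Int) : String :=
  match PySem.Str.split₀ string with
  | [] => "\n"
  | w :: ws =>
    let words := w :: ws
    -- pref[j] = sum of len(word)+1 over words[:j], built by appending (pref[-1] = getLastD)
    let pref := words.foldl (fun acc x => acc ++ [acc.getLastD 0 + PySem.Str.len x + 1]) ([0] : List Int)
    let chunks := pvLines words pref l indent words.length 0 0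
    -- chunks[0] of the (nonempty, since words ≠ []) chunk list, then ''.join of the indented rest
    chunks.headD "" ++
      PySem.Str.join "" ((chunks.drop 1).map (fun c => "\n" ++ pvSpaces indent ++ c)) ++ "\n"

-- ===== PRECONDITION & SPEC =====
def Spec_formatpar (string : String) (l : Int) (indent : Int) (out : String) : Prop := out = formatpar_alt string l indent
instance (string : String) (l : Int) (indent : Int) (out : String) : Decidable (Spec_formatpar string l indent out) := by unfold Spec_formatpar; infer_instance

-- ===== CLAIM (what is proved, stated in full; the proofs are below) =====
def Claim_equal_formatpar : Prop := ∀ (string : String) (l : Int) (indent : Int), Dom_formatpar string l indent → Spec_formatpar string l indent (formatpar string l indent)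

-- ===== LEMMAS AND PROOFS =====

-- the search result is ≥ lo
theorem pvUpperGo_ge (pref : List Int) (t : Int) (lo hi : Nat) : lo ≤ pvUpperGo pref t lo hi := by
  fun_induction pvUpperGo pref t lo hi <;> omega

-- the string A's loop appends after the first word, as a function of the remaining words and current line length
def pvExt (l indent : Int) : List String → Int → String
  | [], _ => ""
  | w :: ws, ll =>
    if ll + PySem.Str.len w > l then
      "\n" ++ pvSpaces indent ++ w ++ pvExt l indent ws (PySem.Str.len w + indent)
    else
      " " ++ w ++ pvExt l indent ws (ll + PySem.Str.len w + 1)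

theorem pvStepA_zero (l indent : Int) (res : String) (ll : Int) (w : String) :
    pvStepA l indent (res, ll, 0) w =
      if ll + PySem.Str.len w > l then
        (res ++ "\n" ++ pvSpaces indent ++ w, PySem.Str.len w + indent, 0)
      else
        (res ++ " " ++ w, ll + PySem.Str.len w + 1, 0) := by
  simp [pvStepA]

-- A's loop after the first word appends exactly pvExt
theorem pvLoopA (l indent : Int) (ws : List String) (res : String) (ll : Int) :
    (ws.foldl (pvStepA l indent) (res, ll, 0)).1 = res ++ pvExt l indent ws ll := by
  induction ws generalizing res ll with
  | nil => simp [pvExt]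
  | cons w ws ih =>
    rw [List.foldl_cons, pvStepA_zero]
    by_cases hb : ll + PySem.Str.len w > l
    · rw [if_pos hb, ih]
      simp only [pvExt]
      rw [if_pos hb]
      simp [String.append_assoc]
    · rw [if_neg hb, ih]
      simp only [pvExt]
      rw [if_neg hb]
      simp [String.append_assoc]

-- ---- join facts ----
theorem pvJoin_singleton (sep : String) (x : String) : PySem.Str.join sep [x] = x := by
  rw [← String.toList_inj, PySem.Str.toList_join]
  simp [PySem.Chars.join_singleton]

theorem pvJoin_cons_cons (sep p q : String) (rest : List String) :
    PySem.Str.join sep (p :: q :: rest) = p ++ sep ++ PySem.Str.join sep (q :: rest) := by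
  rw [← String.toList_inj]
  simp [PySem.Str.toList_join, PySem.Chars.join_cons_cons]

theorem pvJoin_nil_sep_cons (a : String) (L : List String) :
    PySem.Str.join "" (a :: L) = a ++ PySem.Str.join "" L := by
  cases L with
  | nil =>
    rw [pvJoin_singleton]
    rw [← String.toList_inj]
    simp [PySem.Str.toList_join, PySem.Chars.join_nil]
  | cons x r => rw [pvJoin_cons_cons]; simp

theorem pvJoin_head (sep : String) (c : String) (rest : List String) :
    c ++ PySem.Str.join "" (rest.map (fun x => sep ++ x)) = PySem.Str.join sep (c :: rest) := by
  induction rest generalizing c with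
  | nil =>
    rw [pvJoin_singleton]
    rw [← String.toList_inj]
    simp [PySem.Str.toList_join, PySem.Chars.join_nil]
  | cons x r ih =>
    rw [pvJoin_cons_cons, ← ih x]
    simp only [List.map_cons, pvJoin_nil_sep_cons]
    simp [String.append_assoc]

-- tail rendering of a line: " w1 w2 …"
def pvTail (ws : List String) : String := ws.foldr (fun w a => " " ++ w ++ a) ""

theorem pvJoin_sp (w : String) (ws : List String) : PySem.Str.join " " (w :: ws) = w ++ pvTail ws := by
  induction ws generalizing w with
  | nil => simp [pvJoin_singleton, pvTail]
  | cons x r ih =>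
    rw [pvJoin_cons_cons, ih]
    simp [pvTail, String.append_assoc]

-- ---- prefix-sum characterization ----
-- cost of a word list: Σ (len + 1)
def pvCost (ws : List String) : Int := ws.foldr (fun w a => PySem.Str.len w + 1 + a) 0

-- running sums produced after an initial value c
def pvScan (c : Int) : List String → List Int
  | [] => []
  | w :: ws => (c + PySem.Str.len w + 1) :: pvScan (c + PySem.Str.len w + 1) ws

theorem pvLen_nonneg (s : String) : 0 ≤ PySem.Str.len s := by
  simp [PySem.Str.len_eq]

theorem pvCost_append (a b : List String) : pvCost (a ++ b) = pvCost a + pvCost b := by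
  induction a with
  | nil => simp [pvCost]
  | cons w r ih => simp [pvCost] at ih ⊢; omega

theorem pvFold_pref (ws : List String) : ∀ (acc : List Int), acc ≠ [] →
    ws.foldl (fun acc x => acc ++ [acc.getLastD 0 + PySem.Str.len x + 1]) acc
      = acc ++ pvScan (acc.getLastD 0) ws := by
  induction ws with
  | nil => intro acc _; simp [pvScan]
  | cons w r ih =>
    intro acc hacc
    rw [List.foldl_cons, ih _ (by simp)]
    simp [pvScan]

theorem pvScan_length (c : Int) (ws : List String) : (pvScan c ws).length = ws.length := by
  induction ws generalizing c with
  | nil => simp [pvScan]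
  | cons w r ih => simp [pvScan, ih]

theorem pvScan_getD (ws : List String) : ∀ (c : Int) (j : Nat), j < ws.length →
    (pvScan c ws).getD j 0 = c + pvCost (ws.take (j + 1)) := by
  induction ws with
  | nil => intro c j h; simp at h
  | cons w r ih =>
    intro c j h
    cases j with
    | zero => simp [pvScan, pvCost]; ring
    | succ j =>
      simp only [pvScan, List.getD_cons_succ]
      rw [ih _ j (by simpa using h)]
      simp [pvCost, List.take_succ_cons]
      omega

-- pref.getD translated to pvCost of a take
theorem pvPref_getD (words : List String) (j : Nat) (hj : j ≤ words.length) :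
    ((0 : Int) :: pvScan 0 words).getD j 0 = pvCost (words.take j) := by
  cases j with
  | zero => simp [pvCost]
  | succ j =>
    simp only [List.getD_cons_succ]
    rw [pvScan_getD words 0 j (by omega)]
    omega

theorem pvCost_take_step (words : List String) (j : Nat) (hj : j < words.length) :
    pvCost (words.take (j + 1)) = pvCost (words.take j) + PySem.Str.len (words.getD j "") + 1 := by
  rw [List.take_add_one, pvCost_append]
  have : words[j]?.toList = [words.getD j ""] := by
    simp [List.getElem?_eq_getElem hj]
  rw [this]
  simp [pvCost]
  omega

theorem pvCost_take_mono (words : List String) (a b : Nat) :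
    a ≤ b → b ≤ words.length → pvCost (words.take a) ≤ pvCost (words.take b) := by
  induction b with
  | zero =>
    intro hab _
    have ha : a = 0 := by omega
    subst ha; exact le_refl _
  | succ b ih =>
    intro hab hb
    rcases Nat.lt_or_ge a (b + 1) with h | h
    · have h1 := ih (by omega) (by omega)
      rw [pvCost_take_step words b (by omega)]
      have h2 := pvLen_nonneg (words.getD b "")
      omega
    · have : a = b + 1 := by omega
      subst this; exact le_refl _

-- ---- binary-search spec ----
theorem pvUpperGo_le (P : List Int) (t : Int) (lo hi : Nat) (h : lo ≤ hi) :
    pvUpperGo P t lo hi ≤ hi := by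
  fun_induction pvUpperGo P t lo hi with
  | case1 lo hi hlt hle ih => exact ih (by omega)
  | case2 lo hi hlt hgt ih => exact le_trans (ih (by omega)) (by omega)
  | case3 lo hi hlt => omega

theorem pvUpperGo_below (P : List Int) (t : Int) (lo hi : Nat)
    (Hmono : ∀ a b : Nat, a ≤ b → b < P.length → P.getD a 0 ≤ P.getD b 0)
    (hhi : hi ≤ P.length) :
    ∀ m, lo ≤ m → m < pvUpperGo P t lo hi → P.getD m 0 ≤ t := by
  fun_induction pvUpperGo P t lo hi with
  | case1 lo hi hlt hle ih =>
    intro m hm1 hm2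
    rcases Nat.lt_or_ge m ((lo + hi) / 2 + 1) with h | h
    · exact le_trans (Hmono m ((lo + hi) / 2) (by omega) (by omega)) hle
    · exact ih hhi m h hm2
  | case2 lo hi hlt hgt ih => exact ih (by omega)
  | case3 lo hi hlt => intro m hm1 hm2; omega

theorem pvUpperGo_above (P : List Int) (t : Int) (lo hi : Nat)
    (Hmono : ∀ a b : Nat, a ≤ b → b < P.length → P.getD a 0 ≤ P.getD b 0)
    (hhi : hi ≤ P.length)
    (hbig : ∀ m, hi ≤ m → m < P.length → t < P.getD m 0) :
    pvUpperGo P t lo hi < P.length → t < P.getD (pvUpperGo P t lo hi) 0 := by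
  fun_induction pvUpperGo P t lo hi with
  | case1 lo hi hlt hle ih => exact ih hhi hbig
  | case2 lo hi hlt hgt ih =>
    refine ih (by omega) ?_
    intro m hm1 hm2
    exact lt_of_not_ge (fun hc => hgt (le_trans (Hmono ((lo + hi) / 2) m hm1 hm2) hc))
  | case3 lo hi hlt => intro h; exact hbig _ (by omega) h

-- ---- the greedy continuation of one line, in terms of pvCost ----
theorem pvInner (words : List String) (l indent : Int) (i e : Nat) (b : Int)
    (he : e ≤ words.length)
    (hfits : ∀ j, i + 1 ≤ j → j < e →
      pvCost (words.take (j + 1)) ≤ l + 2 + pvCost (words.take i) - b)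
    (hbr : e < words.length →
      l + 2 + pvCost (words.take i) - b < pvCost (words.take (e + 1))) :
    ∀ j, i + 1 ≤ j → j ≤ e →
      pvExt l indent (words.drop j) (b + pvCost (words.take j) - pvCost (words.take i) - 1) =
        pvTail ((words.drop j).take (e - j)) ++
          (if e < words.length then
            "\n" ++ pvSpaces indent ++ words.getD e "" ++
              pvExt l indent (words.drop (e + 1))
                (indent + pvCost (words.take (e + 1)) - pvCost (words.take e) - 1)
          else "") := by
  suffices h : ∀ (k j : Nat), i + 1 ≤ j → j ≤ e → e - j = k →
      pvExt l indent (words.drop j) (b + pvCost (words.take j) - pvCost (words.take i) - 1) =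
        pvTail ((words.drop j).take (e - j)) ++
          (if e < words.length then
            "\n" ++ pvSpaces indent ++ words.getD e "" ++
              pvExt l indent (words.drop (e + 1))
                (indent + pvCost (words.take (e + 1)) - pvCost (words.take e) - 1)
          else "") by
    intro j h1 h2; exact h (e - j) j h1 h2 rfl
  intro k
  induction k with
  | zero =>
    intro j hj1 hj2 hk
    have hje : e = j := by omega
    subst hje
    simp only [Nat.sub_self, List.take_zero, pvTail, List.foldr_nil]
    by_cases hlt : e < words.length
    · rw [if_pos hlt]
      rw [List.drop_eq_getElem_cons hlt]
      have hget : words[e] = words.getD e "" := (List.getD_eq_getElem words "" hlt).symm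
      rw [hget]
      simp only [pvExt]
      have hstep := pvCost_take_step words e hlt
      rw [if_pos (by omega)]
      have harg : PySem.Str.len (words.getD e "") + indent
          = indent + pvCost (words.take (e + 1)) - pvCost (words.take e) - 1 := by omega
      rw [harg]
      simp [String.append_assoc]
    · rw [if_neg hlt]
      have : e = words.length := by omega
      subst this
      simp [pvExt]
  | succ k ih =>
    intro j hj1 hj2 hk
    have hjlt : j < e := by omega
    have hjn : j < words.length := by omega
    rw [List.drop_eq_getElem_cons hjn]
    have hget : words[j] = words.getD j "" := (List.getD_eq_getElem words "" hjn).symm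
    rw [hget]
    simp only [pvExt]
    have hstep := pvCost_take_step words j hjn
    have hfit := hfits j hj1 hjlt
    rw [if_neg (by omega)]
    have harg : b + pvCost (words.take j) - pvCost (words.take i) - 1
          + PySem.Str.len (words.getD j "") + 1
        = b + pvCost (words.take (j + 1)) - pvCost (words.take i) - 1 := by omega
    rw [harg, ih (j + 1) (by omega) (by omega) (by omega)]
    have htake : e - j = (e - (j + 1)) + 1 := by omega
    rw [htake, List.take_succ_cons]
    simp [pvTail, String.append_assoc]

-- ---- main: one line plus the rest, by induction on the remaining words ----
theorem pvMain (words : List String) (l indent : Int) :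
    ∀ (i : Nat) (b : Int), i < words.length →
      words.getD i "" ++ pvExt l indent (words.drop (i + 1))
          (b + pvCost (words.take (i + 1)) - pvCost (words.take i) - 1) =
        PySem.Str.join ("\n" ++ pvSpaces indent)
          (pvLines words ((0 : Int) :: pvScan 0 words) l indent words.length i b) := by
  suffices h : ∀ (k i : Nat) (b : Int), i < words.length → words.length - i = k →
      words.getD i "" ++ pvExt l indent (words.drop (i + 1))
          (b + pvCost (words.take (i + 1)) - pvCost (words.take i) - 1) =
        PySem.Str.join ("\n" ++ pvSpaces indent)
          (pvLines words ((0 : Int) :: pvScan 0 words) l indent words.length i b) by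
    intro i b hi; exact h (words.length - i) i b hi rfl
  intro k
  induction k using Nat.strong_induction_on with
  | _ k ihk =>
  intro i b hi hk
  set P : List Int := (0 : Int) :: pvScan 0 words with hP
  have hPlen : P.length = words.length + 1 := by simp [hP, pvScan_length]
  have hmono : ∀ a c : Nat, a ≤ c → c < P.length → P.getD a 0 ≤ P.getD c 0 := by
    intro a c hac hc
    rw [hP, pvPref_getD words a (by omega), pvPref_getD words c (by omega)]
    exact pvCost_take_mono words a c hac (by omega)
  set T : Int := l + 2 + P.getD i 0 - b with hT
  set r : Nat := pvUpperGo P T (i + 2) P.length with hr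
  have hge : i + 2 ≤ r := pvUpperGo_ge P T (i + 2) P.length
  have hle : r ≤ P.length := pvUpperGo_le P T (i + 2) P.length (by omega)
  set e : Nat := pvBreak P l b i with he'
  have he2 : e = r - 1 := by
    rw [he', pvBreak, ← hT, ← hr]
    omega
  have hei : i + 1 ≤ e := by omega
  have hen : e ≤ words.length := by omega
  have hTc : T = l + 2 + pvCost (words.take i) - b := by
    rw [hT, hP, pvPref_getD words i (by omega)]
  have hfits : ∀ j, i + 1 ≤ j → j < e →
      pvCost (words.take (j + 1)) ≤ l + 2 + pvCost (words.take i) - b := by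
    intro j hj1 hj2
    have hbel := pvUpperGo_below P T (i + 2) P.length hmono (le_refl _) (j + 1) (by omega) (by omega)
    rw [hP, pvPref_getD words (j + 1) (by omega)] at hbel
    omega
  have hbr : e < words.length →
      l + 2 + pvCost (words.take i) - b < pvCost (words.take (e + 1)) := by
    intro hlt
    have hvac : ∀ m, P.length ≤ m → m < P.length → T < P.getD m 0 :=
      fun m hm1 hm2 => absurd (lt_of_le_of_lt hm1 hm2) (lt_irrefl _)
    have h2 := pvUpperGo_above P T (i + 2) P.length hmono (le_refl _) hvac (by omega)
    rw [← hr] at h2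
    have hre : r = e + 1 := by omega
    rw [hre, hP, pvPref_getD words (e + 1) (by omega)] at h2
    omega
  rw [pvLines, dif_pos hi, ← he']
  have hdrop : words.drop i = words.getD i "" :: words.drop (i + 1) := by
    rw [List.drop_eq_getElem_cons hi, List.getD_eq_getElem words "" hi]
  rw [pvInner words l indent i e b hen hfits hbr (i + 1) (le_refl _) hei]
  have htk : e - i = (e - (i + 1)) + 1 := by omega
  rw [hdrop, htk, List.take_succ_cons, pvJoin_sp]
  by_cases hlt : e < words.length
  · rw [if_pos hlt]
    have hih := ihk (words.length - e) (by omega) e indent hlt rfl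
    rw [pvLines, dif_pos hlt]
    rw [pvLines, dif_pos hlt] at hih
    rw [pvJoin_cons_cons, ← hih]
    simp [String.append_assoc]
  · rw [if_neg hlt]
    rw [pvLines, dif_neg (by omega)]
    rw [pvJoin_singleton]
    simp

-- ===== VERDICT (by name: the statement is the Claim_ definition above) =====
theorem formatpar_spec : Claim_equal_formatpar := by
  intro string l indent _
  unfold Spec_formatpar formatpar formatpar_alt
  cases h : PySem.Str.split₀ string with
  | nil => simp
  | cons w ws =>
    dsimp only []
    rw [pvFold_pref (w :: ws) [0] (by simp)]
    simp only [List.foldl_cons]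
    have hfirst : pvStepA l indent ("", 0, 1) w = (w, PySem.Str.len w, 0) := by
      simp [pvStepA]
    rw [hfirst, pvLoopA]
    have hpref : ([(0 : Int)] ++ pvScan (([(0 : Int)]).getLastD 0) (w :: ws))
        = (0 : Int) :: pvScan 0 (w :: ws) := by simp
    rw [hpref]
    have hmain := pvMain (w :: ws) l indent 0 0 (by simp)
    have harg : (0 : Int) + pvCost ((w :: ws).take 1) - pvCost ((w :: ws).take 0) - 1
        = PySem.Str.len w := by
      simp [pvCost]
    rw [harg] at hmain
    simp only [List.getD_cons_zero, List.drop_succ_cons, List.drop_zero] at hmain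
    have hrw : (pvLines (w :: ws) ((0 : Int) :: pvScan 0 (w :: ws)) l indent (w :: ws).length 0 0).headD ""
        ++ PySem.Str.join ""
          (((pvLines (w :: ws) ((0 : Int) :: pvScan 0 (w :: ws)) l indent (w :: ws).length 0 0).drop 1).map
            (fun c => "\n" ++ pvSpaces indent ++ c))
        = PySem.Str.join ("\n" ++ pvSpaces indent)
            (pvLines (w :: ws) ((0 : Int) :: pvScan 0 (w :: ws)) l indent (w :: ws).length 0 0) := by
      rw [pvLines, dif_pos (by simp : 0 < (w :: ws).length)]
      simp only [List.headD_cons, List.drop_succ_cons, List.drop_zero]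
      exact pvJoin_head _ _ _
    rw [hrw, ← hmain]
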